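-- pv_equiv track=rewrite | github.com/yongggquannn/leetcode | rotation-table.py | rotationTable
-- ===== SOURCE A (Python) =====
-- import bisect
--
-- def rotationTable(schedule):
--     # Prevent duplicate timings and sort timings  O (n log n)
--     onCallTimings = set()
--     for _, start, end in schedule:
--         onCallTimings.add(start)
--         onCallTimings.add(end)
--     onCallTimings = sorted(list(onCallTimings)) # [1, 5, 6, 7, 10, 12, 15, 17]
--
--     listNames = [[] for _ in range(len(onCallTimings) - 1)]
--
--     for name, start, end in schedule:
--         leftIdx = bisect.bisect_left(onCallTimings, start)
--         rightIdx = bisect.bisect_left(onCallTimings, end) - 1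
--         for i in range(leftIdx, rightIdx + 1):
--             listNames[i].append(name)
--
--     intervalToNames = {}
--
--     for j in range(len(onCallTimings) - 1):
--         # Do not display anybody that is not on call during interval
--         if len(listNames[j]) == 0:
--             continue
--         intervalToNames[f"{onCallTimings[j]} - {onCallTimings[j + 1]}"] = listNames[j]
--
--     return intervalToNames
-- ===== SOURCE B (Python) =====
-- def rotationTable(schedule):
--     # interval-outer / schedule-inner: build each interval's name list directly
--     timings = sorted({t for _, s, e in schedule for t in (s, e)})
--     result = {}
--     for j in range(len(timings) - 1):
--         lo, hi = timings[j], timings[j + 1]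
--         names = [name for name, s, e in schedule if s <= lo and hi <= e]
--         if names:
--             result[f"{lo} - {hi}"] = names
--     return result
-- ===== Notes on version B (the rewrite author's own statement) =====
-- stated objective: simpler
-- what changed: Replaces A's bisect-based schedule-outer fill of a mutable per-interval array (plus a separate dict-building pass) with a single interval-outer loop that filters the schedule by direct interval-containment comparisons and builds the dict directly.
import Mathlib
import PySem

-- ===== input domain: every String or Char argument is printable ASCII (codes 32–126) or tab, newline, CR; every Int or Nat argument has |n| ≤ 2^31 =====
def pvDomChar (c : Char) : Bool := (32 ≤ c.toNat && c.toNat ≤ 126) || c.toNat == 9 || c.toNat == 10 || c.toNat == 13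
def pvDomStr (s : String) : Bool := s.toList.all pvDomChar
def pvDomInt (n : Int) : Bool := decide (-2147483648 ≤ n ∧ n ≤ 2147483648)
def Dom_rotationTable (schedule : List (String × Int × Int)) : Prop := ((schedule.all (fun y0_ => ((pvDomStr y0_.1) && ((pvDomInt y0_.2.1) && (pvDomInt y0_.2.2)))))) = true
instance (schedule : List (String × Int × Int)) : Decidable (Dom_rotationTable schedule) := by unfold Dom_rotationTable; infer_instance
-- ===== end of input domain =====

-- B replaces A's bisect-based schedule-outer fill of a per-interval array with a single
-- interval-outer loop filtering the schedule directly (objective: simpler decomposition).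

-- ===== PORT A =====
-- All list indices below are provably in range (bisect_left of an element present in the
-- sorted list is < length), so the total forms pyGetD/pySetD are exact here.
def rotationTable (schedule : List (String × Int × Int)) : List (String × List String) :=
  let onSet : PySem.Set Int :=
    schedule.foldl (fun s y => PySem.Set.add (PySem.Set.add s y.2.1) y.2.2) PySem.Set.empty
  let onCallTimings : List Int := PySem.List.sorted onSet (fun x => x) false
  let listNames : List (List String) :=
    (PySem.List.pyRange 0 ((onCallTimings.length : Int) - 1) 1).map (fun _ => ([] : List String))
  let listNames : List (List String) :=
    schedule.foldl (fun ln y =>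
      let leftIdx : Nat := PySem.List.bisectLeft onCallTimings y.2.1
      let rightIdx : Int := (PySem.List.bisectLeft onCallTimings y.2.2 : Int) - 1
      (PySem.List.pyRange (leftIdx : Int) (rightIdx + 1) 1).foldl
        (fun ln i => PySem.List.pySetD ln i (PySem.List.pyGetD ln i [] ++ [y.1])) ln) listNames
  let d : PySem.Dict String (List String) :=
    (PySem.List.pyRange 0 ((onCallTimings.length : Int) - 1) 1).foldl
      (fun d j =>
        if (PySem.List.pyGetD listNames j []).length = 0 then d
        else d.insert
          (PySem.Int.toStr (PySem.List.pyGetD onCallTimings j 0) ++ " - " ++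
            PySem.Int.toStr (PySem.List.pyGetD onCallTimings (j + 1) 0))
          (PySem.List.pyGetD listNames j [])) PySem.Dict.empty
  d.items

-- ===== PORT B =====
def rotationTable_alt (schedule : List (String × Int × Int)) : List (String × List String) :=
  let timings : List Int :=
    PySem.List.sorted (PySem.Set.ofList (schedule.flatMap (fun y => [y.2.1, y.2.2]))) (fun x => x) false
  let result : PySem.Dict String (List String) :=
    (PySem.List.pyRange 0 ((timings.length : Int) - 1) 1).foldl
      (fun res j =>
        let lo := PySem.List.pyGetD timings j 0
        let hi := PySem.List.pyGetD timings (j + 1) 0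
        let names := (schedule.filter (fun y => decide (y.2.1 ≤ lo) && decide (hi ≤ y.2.2))).map (fun y => y.1)
        if names = [] then res
        else res.insert (PySem.Int.toStr lo ++ " - " ++ PySem.Int.toStr hi) names) PySem.Dict.empty
  result.items

-- ===== PRECONDITION & SPEC =====
def Spec_rotationTable (schedule : List (String × Int × Int)) (out : List (String × List String)) : Prop := out = rotationTable_alt schedule
instance (schedule : List (String × Int × Int)) (out : List (String × List String)) : Decidable (Spec_rotationTable schedule out) := by unfold Spec_rotationTable; infer_instance

-- ===== CLAIM (what is proved, stated in full; the proofs are below) =====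
def Claim_equal_rotationTable : Prop := ∀ (schedule : List (String × Int × Int)), Dom_rotationTable schedule → Spec_rotationTable schedule (rotationTable schedule)

-- ===== LEMMAS AND PROOFS =====

-- A's set-building loop is set(flatMap of the endpoint pairs)
lemma setfold_eq (schedule : List (String × Int × Int)) (s0 : PySem.Set Int) :
    schedule.foldl (fun s y => PySem.Set.add (PySem.Set.add s y.2.1) y.2.2) s0
      = (schedule.flatMap (fun y => [y.2.1, y.2.2])).foldl PySem.Set.add s0 := by
  induction schedule generalizing s0 with
  | nil => rfl
  | cons y tl ih => simp [List.flatMap_cons, ih]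

-- effect of A's inner range loop on one slot
lemma rangeFill (nm : String) (a b : Int) (k : Nat) (ln : List (List String))
    (ha : 0 ≤ a) (hb : b ≤ (ln.length : Int)) (hk : k < ln.length) :
    (((PySem.List.pyRange a b 1).foldl
        (fun ln i => PySem.List.pySetD ln i (PySem.List.pyGetD ln i [] ++ [nm])) ln).getD k [])
      = if a ≤ (k : Int) ∧ (k : Int) < b then ln.getD k [] ++ [nm] else ln.getD k [] := by
  by_cases hab : b ≤ a
  · rw [PySem.List.pyRange_one_eq_nil hab]
    simp only [List.foldl_nil]
    rw [if_neg]; omega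
  · replace hab : a < b := by omega
    rw [PySem.List.pyRange_one_cons hab]
    simp only [List.foldl_cons]
    have hset : PySem.List.pySetD ln a (PySem.List.pyGetD ln a [] ++ [nm])
        = ln.set a.toNat (PySem.List.pyGetD ln a [] ++ [nm]) :=
      PySem.List.pySetD_of_nonneg ln _ ha
    have hlen : (ln.set a.toNat (PySem.List.pyGetD ln a [] ++ [nm])).length = ln.length := by
      simp
    have ih := rangeFill nm (a + 1) b k
      (ln.set a.toNat (PySem.List.pyGetD ln a [] ++ [nm])) (by omega) (by omega) (by omega)
    rw [hset, ih]
    have hga : PySem.List.pyGetD ln a [] = ln[a.toNat]'(by omega) :=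
      PySem.List.pyGetD_eq_getElem ln [] ha (by omega)
    by_cases hka : (k : Int) = a
    · have hkn : k = a.toNat := by omega
      rw [if_neg (by omega), if_pos (by omega)]
      subst hkn
      rw [List.getD_eq_getElem?_getD, List.getElem?_set_self (by omega)]
      simp only [Option.getD_some]
      rw [hga, List.getD_eq_getElem _ _ (show a.toNat < ln.length by omega)]
    · have hne : a.toNat ≠ k := by omega
      have : (ln.set a.toNat (PySem.List.pyGetD ln a [] ++ [nm])).getD k [] = ln.getD k [] := by
        rw [List.getD_eq_getElem?_getD, List.getElem?_set_ne hne, ← List.getD_eq_getElem?_getD]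
      rw [this]
      by_cases h1 : a + 1 ≤ (k : Int) ∧ (k : Int) < b
      · rw [if_pos h1, if_pos (by omega)]
      · rw [if_neg h1, if_neg (by omega)]
termination_by (b - a).toNat
decreasing_by omega

-- the bisect window [bisectLeft s, bisectLeft e) contains k iff interval k lies inside [s, e]
lemma bisect_cond (T : List Int) (hT : T.Pairwise (· < ·)) (s e : Int) (heT : e ∈ T)
    (k : Nat) (hk : k + 1 < T.length) :
    (((PySem.List.bisectLeft T s : Int) ≤ (k : Int) ∧ (k : Int) < (PySem.List.bisectLeft T e : Int))
      ↔ (s ≤ T[k]'(by omega) ∧ T[k + 1]'(by omega) ≤ e)) := by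
  have hmono : ∀ i j : Nat, (hij : i < j) → (hj : j < T.length) → T[i]'(by omega) < T[j]'hj := by
    intro i j hij hj
    exact (List.pairwise_iff_getElem.mp hT) i j (by omega) hj hij
  have hle : T.Pairwise (· ≤ ·) := hT.imp (fun h => le_of_lt h)
  obtain ⟨hsb, hslt, hsge⟩ := PySem.List.bisectLeft_spec T s hle
  obtain ⟨heb, helt, hege⟩ := PySem.List.bisectLeft_spec T e hle
  constructor
  · rintro ⟨h1, h2⟩
    refine ⟨hsge k (by omega) (by omega), ?_⟩
    -- T[k] < e; since e occurs at some index m, m > k, so T[k+1] ≤ T[m] = e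
    have hTk : T[k]'(by omega) < e := helt k (by omega) (by omega)
    obtain ⟨m, hm, hme⟩ := List.getElem_of_mem heT
    by_cases hmk : m ≤ k
    · exfalso
      rcases Nat.lt_or_ge m k with hlt | hge
      · exact absurd (hmono m k hlt (by omega)) (by omega)
      · have : m = k := by omega
        subst this; omega
    · have : k + 1 ≤ m := by omega
      rcases Nat.lt_or_ge (k + 1) m with hlt | hge
      · have := hmono (k + 1) m hlt hm; omega
      · have : m = k + 1 := by omega
        subst this; omega
  · rintro ⟨h1, h2⟩
    constructor
    · by_contra h
      have : k < PySem.List.bisectLeft T s := by omega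
      have := hslt k (by omega) this; omega
    · by_contra h
      have hge : PySem.List.bisectLeft T e ≤ k := by omega
      have h3 := hege k (by omega) hge
      have h4 := hmono k (k + 1) (by omega) hk
      omega

-- the inner range loop preserves the list length
lemma foldl_pySetD_length (nm : String) (r : List Int) (ln : List (List String)) :
    (r.foldl (fun ln i => PySem.List.pySetD ln i (PySem.List.pyGetD ln i [] ++ [nm])) ln).length
      = ln.length := by
  induction r generalizing ln with
  | nil => rfl
  | cons i tl ih =>
    simp only [List.foldl_cons]
    rw [ih, PySem.List.length_pySetD]

-- A's filling loop computes, at slot k, exactly B's filter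
lemma fill_eq (T : List Int) (hT : T.Pairwise (· < ·)) (k : Nat) (hk : k + 1 < T.length)
    (sch : List (String × Int × Int)) (he : ∀ y ∈ sch, y.2.2 ∈ T)
    (ln : List (List String)) (hlen : ln.length = T.length - 1) :
    ((sch.foldl (fun ln y =>
        (PySem.List.pyRange ((PySem.List.bisectLeft T y.2.1 : Nat) : Int)
            (((PySem.List.bisectLeft T y.2.2 : Int) - 1) + 1) 1).foldl
          (fun ln i => PySem.List.pySetD ln i (PySem.List.pyGetD ln i [] ++ [y.1])) ln) ln).getD k []
      = ln.getD k [] ++ ((sch.filter (fun y =>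
          decide (y.2.1 ≤ T[k]'(by omega)) && decide (T[k + 1]'(by omega) ≤ y.2.2))).map (fun y => y.1)))
    ∧ ((sch.foldl (fun ln y =>
        (PySem.List.pyRange ((PySem.List.bisectLeft T y.2.1 : Nat) : Int)
            (((PySem.List.bisectLeft T y.2.2 : Int) - 1) + 1) 1).foldl
          (fun ln i => PySem.List.pySetD ln i (PySem.List.pyGetD ln i [] ++ [y.1])) ln) ln).length
      = ln.length) := by
  induction sch generalizing ln with
  | nil => simp
  | cons y tl ih =>
    have hye : y.2.2 ∈ T := he y (List.mem_cons_self)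
    -- bisectLeft of a member is < length (its window end stays within the slots)
    have hbe : PySem.List.bisectLeft T y.2.2 ≤ T.length - 1 := by
      have hle : T.Pairwise (· ≤ ·) := hT.imp (fun h => le_of_lt h)
      obtain ⟨heb, helt, hege⟩ := PySem.List.bisectLeft_spec T y.2.2 hle
      obtain ⟨m, hm, hme⟩ := List.getElem_of_mem hye
      by_contra h
      have : m < PySem.List.bisectLeft T y.2.2 := by omega
      have := helt m hm this; omega
    have hstep_len :
        ((PySem.List.pyRange ((PySem.List.bisectLeft T y.2.1 : Nat) : Int)
            (((PySem.List.bisectLeft T y.2.2 : Int) - 1) + 1) 1).foldl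
          (fun ln i => PySem.List.pySetD ln i (PySem.List.pyGetD ln i [] ++ [y.1])) ln).length
          = ln.length := foldl_pySetD_length y.1 _ ln
    have hrf := rangeFill y.1 ((PySem.List.bisectLeft T y.2.1 : Nat) : Int)
        (((PySem.List.bisectLeft T y.2.2 : Int) - 1) + 1) k ln
        (by positivity) (by omega) (by omega)
    have hcond := bisect_cond T hT y.2.1 y.2.2 hye k hk
    simp only [List.foldl_cons]
    obtain ⟨ih1, ih2⟩ := ih (fun z hz => he z (List.mem_cons_of_mem _ hz)) _ (by rw [hstep_len]; exact hlen)
    refine ⟨?_, by rw [ih2, hstep_len]⟩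
    rw [ih1, hrf, List.filter_cons]
    by_cases hc : y.2.1 ≤ T[k]'(by omega) ∧ T[k + 1]'(by omega) ≤ y.2.2
    · have hw := hcond.mpr hc
      rw [if_pos (show ((PySem.List.bisectLeft T y.2.1 : Nat) : Int) ≤ (k : Int) ∧
          (k : Int) < ((PySem.List.bisectLeft T y.2.2 : Int) - 1) + 1 from ⟨hw.1, by omega⟩)]
      simp only [hc.1, hc.2, decide_true, Bool.and_self, if_true]
      simp
    · have hnc : ¬ (((PySem.List.bisectLeft T y.2.1 : Nat) : Int) ≤ (k : Int) ∧
          (k : Int) < ((PySem.List.bisectLeft T y.2.2 : Int) - 1) + 1) := by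
        intro h
        exact hc (hcond.mp ⟨h.1, by omega⟩)
      rw [if_neg hnc]
      have hfalse : (decide (y.2.1 ≤ T[k]'(by omega)) && decide (T[k + 1]'(by omega) ≤ y.2.2)) = false := by
        rcases Decidable.not_and_iff_not_or_not.mp hc with h | h <;> simp [h]
      rw [hfalse]
      simp

theorem rotationTable_eq (schedule : List (String × Int × Int)) :
    rotationTable schedule = rotationTable_alt schedule := by
  unfold rotationTable rotationTable_alt
  dsimp only
  rw [setfold_eq, show (PySem.Set.empty : PySem.Set Int) = [] from rfl,
      ← PySem.Set.ofList_eq_foldl]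
  set T : List Int :=
    PySem.List.sorted (PySem.Set.ofList (schedule.flatMap (fun y => [y.2.1, y.2.2]))) (fun x => x) false with hTdef
  have hT : T.Pairwise (· < ·) := PySem.List.sorted_ofList_pairwise_lt _
  have he : ∀ y ∈ schedule, y.2.2 ∈ T := by
    intro y hy
    rw [hTdef, PySem.List.mem_sorted, PySem.Set.mem_ofList]
    exact List.mem_flatMap.mpr ⟨y, hy, by simp⟩
  have hlen0 : ((PySem.List.pyRange 0 ((T.length : Int) - 1) 1).map
      (fun _ => ([] : List String))).length = T.length - 1 := by
    rw [List.length_map, PySem.List.length_pyRange_one]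
    omega
  congr 1
  apply PySem.List.foldl_congr_mem
  intro d j hj
  rw [PySem.List.mem_pyRange_one] at hj
  obtain ⟨hj0, hj1⟩ := hj
  have hkdef : ((j.toNat : Int)) = j := by omega
  have hk : j.toNat + 1 < T.length := by omega
  obtain ⟨hfill, hflen⟩ := fill_eq T hT j.toNat hk schedule he _ hlen0
  have hinit : ((PySem.List.pyRange 0 ((T.length : Int) - 1) 1).map
      (fun _ => ([] : List String))).getD j.toNat [] = [] := by
    rcases Nat.lt_or_ge j.toNat ((PySem.List.pyRange 0 ((T.length : Int) - 1) 1).map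
        (fun _ => ([] : List String))).length with h | h
    · rw [List.getD_eq_getElem _ _ h]; simp
    · rw [List.getD_eq_default _ _ h]
  have hnames : PySem.List.pyGetD
      (schedule.foldl (fun ln y =>
        (PySem.List.pyRange ((PySem.List.bisectLeft T y.2.1 : Nat) : Int)
            (((PySem.List.bisectLeft T y.2.2 : Int) - 1) + 1) 1).foldl
          (fun ln i => PySem.List.pySetD ln i (PySem.List.pyGetD ln i [] ++ [y.1])) ln)
        ((PySem.List.pyRange 0 ((T.length : Int) - 1) 1).map (fun _ => ([] : List String)))) j []
      = (schedule.filter (fun y =>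
          decide (y.2.1 ≤ T[j.toNat]'(by omega)) && decide (T[j.toNat + 1]'(by omega) ≤ y.2.2))).map (fun y => y.1) := by
    rw [PySem.List.pyGetD_eq_getElem _ [] hj0 (by rw [hflen, hlen0]; omega)]
    rw [← List.getD_eq_getElem _ ([] : List String) (by rw [hflen, hlen0]; omega)]
    rw [hfill, hinit, List.nil_append]
  have hlo : PySem.List.pyGetD T j 0 = T[j.toNat]'(by omega) :=
    PySem.List.pyGetD_eq_getElem T 0 hj0 (by omega)
  have hhi : PySem.List.pyGetD T (j + 1) 0 = T[j.toNat + 1]'(by omega) := by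
    have := PySem.List.pyGetD_eq_getElem T (i := j + 1) 0 (by omega) (by omega)
    rw [this]
    congr 1
    omega
  simp only [hnames, hlo, hhi]
  by_cases hemp : (schedule.filter (fun y =>
      decide (y.2.1 ≤ T[j.toNat]'(by omega)) && decide (T[j.toNat + 1]'(by omega) ≤ y.2.2))).map (fun y => y.1) = []
  · rw [hemp]; simp
  · rw [if_neg (by simpa using hemp), if_neg (by simp [hemp])]

-- ===== VERDICT (by name: the statement is the Claim_ definition above) =====
theorem rotationTable_spec : Claim_equal_rotationTable := by
  intro schedule _
  unfold Spec_rotationTable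
  exact rotationTable_eq schedule
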